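-- pv_equiv track=rewrite | github.com/sizzleguyandy/run_coach | coach_core/engine/workouts.py | _gap_days
-- ===== SOURCE A (Python) =====
-- DAYS_ORDER = ["Mon", "Tue", "Wed", "Thu", "Fri", "Sat", "Sun"]
--
-- def _day_idx(day: str) -> int:
--     return DAYS_ORDER.index(day)
--
-- def _gap_days(quality_day: str, long_run_day: str) -> list[str]:
--     """
--     Days strictly between quality_day and long_run_day going forward.
--     e.g. quality=Tue, long_run=Sat → [Wed, Thu, Fri]
--     """
--     q = _day_idx(quality_day)
--     lr = _day_idx(long_run_day)
--     days = []
--     idx = (q + 1) % 7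
--     while idx != lr:
--         days.append(DAYS_ORDER[idx])
--         idx = (idx + 1) % 7
--     return days
-- ===== SOURCE B (Python) =====
-- DAYS_ORDER = ["Mon", "Tue", "Wed", "Thu", "Fri", "Sat", "Sun"]
--
-- def _gap_days(quality_day: str, long_run_day: str) -> list[str]:
--     # Everything in the doubled week after quality_day, up to the next
--     # occurrence of long_run_day by name.
--     tail = (DAYS_ORDER + DAYS_ORDER)[DAYS_ORDER.index(quality_day) + 1:]
--     return tail[:tail.index(long_run_day)]
-- ===== Notes on version B (the rewrite author's own statement) =====
-- stated objective: alternative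
-- what changed: Instead of stepping indices modulo 7 until hitting the target, B takes the tail of a doubled week after quality_day and slices it up to the first occurrence of long_run_day found by name (no modular arithmetic, no index walk).
import Mathlib
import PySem

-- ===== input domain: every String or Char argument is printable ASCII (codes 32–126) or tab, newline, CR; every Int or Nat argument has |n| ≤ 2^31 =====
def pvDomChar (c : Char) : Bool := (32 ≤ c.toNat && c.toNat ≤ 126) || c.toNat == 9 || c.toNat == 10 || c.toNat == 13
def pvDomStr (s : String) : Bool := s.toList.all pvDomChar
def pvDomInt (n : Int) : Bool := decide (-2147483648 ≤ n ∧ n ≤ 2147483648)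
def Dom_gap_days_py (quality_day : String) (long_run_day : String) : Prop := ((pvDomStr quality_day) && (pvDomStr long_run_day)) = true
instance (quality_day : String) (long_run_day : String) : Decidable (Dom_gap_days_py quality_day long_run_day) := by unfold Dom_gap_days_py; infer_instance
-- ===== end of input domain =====

-- B replaces A's modular index walk with a doubled-week tail slice cut at the first occurrence of long_run_day by name (objective: alternative decomposition).
-- occurrence of long_run_day by name (objective: alternative decomposition).


-- ===== PORT A =====
-- A walks indices one step at a time until it reaches lr; fuel 7 is a totality
-- guard only (the loop takes at most 6 steps when both days are valid).
def daysOrderA : List String := ["Mon", "Tue", "Wed", "Thu", "Fri", "Sat", "Sun"]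

def gapLoopA (fuel : Nat) (idx lr : Int) : List String :=
  match fuel with
  | 0 => []
  | f + 1 =>
    if idx ≠ lr then
      match PySem.List.pyGet? daysOrderA idx with
      | some d => d :: gapLoopA f (PySem.Int.mod (idx + 1) 7) lr
      | none => []
    else []

def gap_days_py (quality_day : String) (long_run_day : String) : List String :=
  match PySem.List.index? daysOrderA quality_day, PySem.List.index? daysOrderA long_run_day with
  | some q, some lr => gapLoopA 7 (PySem.Int.mod ((q : Int) + 1) 7) (lr : Int)
  | _, _ => []  -- unreachable under Pre_: Python raises ValueError here

-- ===== PORT B =====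
def daysOrderB : List String := ["Mon", "Tue", "Wed", "Thu", "Fri", "Sat", "Sun"]

def gap_days_py_alt (quality_day : String) (long_run_day : String) : List String :=
  -- [] on a day name outside DAYS_ORDER (unreachable under Pre_: Python raises ValueError there)
  match PySem.List.index? daysOrderB quality_day with
  | none => []
  | some qi =>
    let tail := PySem.List.slice (daysOrderB ++ daysOrderB) (some ((qi : Int) + 1)) none
    match PySem.List.index? tail long_run_day with
    | none => []
    | some s => PySem.List.slice tail none (some ((s : Int)))

-- ===== PRECONDITION & SPEC =====
-- Pre_ excludes exactly the inputs where A raises ValueError (a day name not in DAYS_ORDER).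
def Pre_gap_days_py (quality_day : String) (long_run_day : String) : Prop :=
  quality_day ∈ ["Mon", "Tue", "Wed", "Thu", "Fri", "Sat", "Sun"] ∧ long_run_day ∈ ["Mon", "Tue", "Wed", "Thu", "Fri", "Sat", "Sun"]
instance (quality_day : String) (long_run_day : String) : Decidable (Pre_gap_days_py quality_day long_run_day) := by unfold Pre_gap_days_py; infer_instance
def pvWitness_gap_days_py : String × String := ("Tue", "Sat")

def Spec_gap_days_py (quality_day : String) (long_run_day : String) (out : List String) : Prop := out = gap_days_py_alt quality_day long_run_day
instance (quality_day : String) (long_run_day : String) (out : List String) : Decidable (Spec_gap_days_py quality_day long_run_day out) := by unfold Spec_gap_days_py; infer_instance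

-- ===== CLAIM (what is proved, stated in full; the proofs are below) =====
def Claim_equal_gap_days_py : Prop := ∀ (quality_day : String) (long_run_day : String), Dom_gap_days_py quality_day long_run_day → Pre_gap_days_py quality_day long_run_day → Spec_gap_days_py quality_day long_run_day (gap_days_py quality_day long_run_day)

-- ===== LEMMAS AND PROOFS =====
theorem gap_days_eq_on_days : ∀ q ∈ ["Mon", "Tue", "Wed", "Thu", "Fri", "Sat", "Sun"], ∀ l ∈ ["Mon", "Tue", "Wed", "Thu", "Fri", "Sat", "Sun"],
    gap_days_py q l = gap_days_py_alt q l := by decide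

-- ===== VERDICT =====
theorem gap_days_py_spec : Claim_equal_gap_days_py := by
  intro q l _ hpre
  exact gap_days_eq_on_days q hpre.1 l hpre.2
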